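-- pv_equiv track=rewrite | github.com/MateOkinashvili/GOA-homework-okina | day 159/Classwork/classwork.py | solution
-- ===== SOURCE A (Python) =====
-- def solution(s):
--     result = ""
--     for i in s:
--         if 'A' <= i <= 'Z':
--             result += " " + i
--         else:
--             result += i
--     return result
-- ===== SOURCE B (Python) =====
-- import re
--
-- def solution(s):
--     return re.sub(r'([A-Z])', r' \1', s)
-- ===== Notes on version B (the rewrite author's own statement) =====
-- stated objective: idiomatic
-- what changed: Replaced the explicit per-character loop with string concatenation by a single regex substitution that rewrites each uppercase letter to a space plus itself.
import Mathlib
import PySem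

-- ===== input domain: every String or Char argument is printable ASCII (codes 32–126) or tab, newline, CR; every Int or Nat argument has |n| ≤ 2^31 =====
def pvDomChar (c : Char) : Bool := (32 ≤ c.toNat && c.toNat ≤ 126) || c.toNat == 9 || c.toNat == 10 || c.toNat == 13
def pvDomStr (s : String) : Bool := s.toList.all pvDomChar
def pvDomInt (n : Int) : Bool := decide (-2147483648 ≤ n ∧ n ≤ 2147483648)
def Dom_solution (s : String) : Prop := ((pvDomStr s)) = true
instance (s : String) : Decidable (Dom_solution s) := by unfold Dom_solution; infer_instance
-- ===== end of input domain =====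

-- B replaces A's per-character concat loop with a single regex substitution (ported as one flatMap over the characters); objective: idiomatic.


-- ===== PORT A =====
def solutionStep (result : String) (i : Char) : String :=
  if 'A' ≤ i ∧ i ≤ 'Z' then result ++ " " ++ String.ofList [i] else result ++ String.ofList [i]

def solution (s : String) : String :=
  s.toList.foldl solutionStep ""

-- ===== PORT B =====
-- regex sub: each [A-Z] match is rewritten to ' ' + itself; non-matching chars pass through
def solution_alt (s : String) : String :=
  String.ofList (s.toList.flatMap (fun c => if 'A' ≤ c ∧ c ≤ 'Z' then [' ', c] else [c]))

-- ===== PRECONDITION & SPEC =====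
def Spec_solution (s : String) (out : String) : Prop := out = solution_alt s
instance (s : String) (out : String) : Decidable (Spec_solution s out) := by unfold Spec_solution; infer_instance

-- ===== CLAIM (what is proved, stated in full; the proofs are below) =====
def Claim_equal_solution : Prop := ∀ (s : String), Dom_solution s → Spec_solution s (solution s)

-- ===== LEMMAS AND PROOFS =====

-- ===== VERDICT (by name: the statement is the Claim_ definition above) =====
theorem foldl_step (l : List Char) (acc : String) :
    l.foldl solutionStep acc = acc ++ String.ofList (l.flatMap (fun c => if 'A' ≤ c ∧ c ≤ 'Z' then [' ', c] else [c])) := by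
  induction l generalizing acc with
  | nil => simp
  | cons c t ih =>
    simp only [List.foldl, List.flatMap_cons, ih, solutionStep]
    split
    · simp [← String.ofList_append, String.append_assoc]
      rw [show (" " : String) = String.ofList [' '] from rfl, ← String.ofList_append]
      rfl
    · simp [← String.ofList_append, String.append_assoc]

theorem solution_spec : Claim_equal_solution := by
  intro s _
  unfold Spec_solution solution solution_alt
  rw [foldl_step]
  rfl
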